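-- pv_equiv track=rewrite | github.com/cloud-brain/algorithm | hiho/1039/code.py | clear_letter
-- ===== SOURCE A (Python) =====
-- def clear_letter(x):
--     x = list(x)
--     pre_char = x[0]
--     count = 0
--     i = 0
--     while i < len(x):
--         pre_char = x[i]
--         i = i + 1
--         if i >= len(x):
--             break
--         if(x[i] == pre_char):
--             end_flag = i + 1
--             while(end_flag < len(x) and x[end_flag] == pre_char):
--                 end_flag = end_flag + 1
--             del x[(i - 1):end_flag]
--             count = count + end_flag - i + 1
--             i = i - 1
--     return count
-- ===== SOURCE B (Python) =====
-- def clear_letter(x):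
--     # One O(n) pass: sum the lengths of maximal runs whose length is >= 2.
--     count = 0
--     run = 0
--     prev = None
--     for c in x:
--         if prev is not None and c == prev:
--             run += 1
--         else:
--             if run >= 2:
--                 count += run
--             run = 1
--             prev = c
--     if run >= 2:
--         count += run
--     return count
-- ===== Notes on version B (the rewrite author's own statement) =====
-- stated objective: faster
-- what changed: Replaced the index-juggling while loop that repeatedly deletes run slices from the list (each del is O(n)) by a single left-to-right pass that accumulates the current run length and adds it to the total when the run ends and its length is >= 2.
import Mathlib
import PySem

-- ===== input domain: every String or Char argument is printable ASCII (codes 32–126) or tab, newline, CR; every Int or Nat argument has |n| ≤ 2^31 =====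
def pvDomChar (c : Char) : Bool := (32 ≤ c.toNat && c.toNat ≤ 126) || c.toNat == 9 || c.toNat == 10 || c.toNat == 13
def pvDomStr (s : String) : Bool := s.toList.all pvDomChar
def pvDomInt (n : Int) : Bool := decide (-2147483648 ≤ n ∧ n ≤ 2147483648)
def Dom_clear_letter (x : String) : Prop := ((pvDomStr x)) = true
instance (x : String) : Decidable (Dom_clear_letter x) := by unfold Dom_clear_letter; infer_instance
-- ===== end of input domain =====

-- B replaces A's quadratic delete-and-backtrack while loop by a single pass summing
-- maximal run lengths that are ≥ 2 (measured asymptotically faster; exact same results).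


-- ===== PORT A =====
-- inner while: end_flag extension — smallest j ≥ start with j = len or x[j] ≠ pre
def pvRunEnd (x : List Char) (pre : Char) (j : Nat) : Nat :=
  if h : j < x.length then
    if x[j] = pre then pvRunEnd x pre (j + 1) else j
  else j
termination_by x.length - j
decreasing_by omega

lemma pvRunEnd_bounds (x : List Char) (pre : Char) (j : Nat) :
    j ≤ x.length → j ≤ pvRunEnd x pre j ∧ pvRunEnd x pre j ≤ x.length := by
  induction j using pvRunEnd.induct x pre with
  | case1 j hj hx ih =>
    intro _
    rw [pvRunEnd, dif_pos hj, if_pos hx]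
    have := ih (by omega)
    omega
  | case2 j hj hx => intro _; rw [pvRunEnd, dif_pos hj, if_neg hx]; omega
  | case3 j hj => intro h; rw [pvRunEnd, dif_neg hj]; omega

-- outer while loop of A; state (x, i, count); del x[i'-1:end_flag] = take/drop splice
def pvLoopA (x : List Char) (i : Nat) (count : Int) : Int :=
  if h : i < x.length then
    -- pre_char = x[i]; i = i + 1; the run starting at the new i is extended and spliced out
    if h2 : i + 1 < x.length then
      if x[i + 1] = x[i] then
        pvLoopA (x.take (i + 1 - 1) ++ x.drop (pvRunEnd x x[i] (i + 1 + 1))) (i + 1 - 1)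
          (count + ((pvRunEnd x x[i] (i + 1 + 1) : Int)) - ((i : Int) + 1) + 1)
      else
        pvLoopA x (i + 1) count
    else count
  else count
termination_by 3 * x.length - i
decreasing_by
  · -- deletion branch: list shrinks by ef - i ≥ 2, i goes back by 1
    have h4 := pvRunEnd_bounds x x[i] (i + 1 + 1) h2
    simp only [List.length_append, List.length_take, List.length_drop]
    omega
  · omega

def clear_letter (x : String) : Int :=
  -- x = list(x); pre_char = x[0] raises on "" (excluded by Pre_); the loop re-sets pre each step
  pvLoopA x.toList 0 0

-- ===== PORT B =====
-- B's for-loop: state (prev, run, count)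
def pvLoopB (l : List Char) (prev : Option Char) (run : Int) (count : Int) : Int :=
  match l with
  | [] => if run ≥ 2 then count + run else count
  | c :: rest =>
    if some c = prev then pvLoopB rest prev (run + 1) count
    else pvLoopB rest (some c) 1 (if run ≥ 2 then count + run else count)

def clear_letter_alt (x : String) : Int :=
  pvLoopB x.toList none 0 0

-- ===== PRECONDITION & SPEC =====
-- Pre_ excludes only the empty string, on which A raises IndexError at x[0].
def Pre_clear_letter (x : String) : Prop := x ≠ ""
instance (x : String) : Decidable (Pre_clear_letter x) := by unfold Pre_clear_letter; infer_instance
def pvWitness_clear_letter : String := "abba"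

def Spec_clear_letter (x : String) (out : Int) : Prop := out = clear_letter_alt x
instance (x : String) (out : Int) : Decidable (Spec_clear_letter x out) := by unfold Spec_clear_letter; infer_instance

-- ===== CLAIM (what is proved, stated in full; the proofs are below) =====
def Claim_equal_clear_letter : Prop := ∀ (x : String), Dom_clear_letter x → Pre_clear_letter x → Spec_clear_letter x (clear_letter x)

-- ===== LEMMAS AND PROOFS =====

-- number of leading chars equal to a
def pvLead (a : Char) : List Char → Nat
  | [] => 0
  | b :: t => if b = a then 1 + pvLead a t else 0

-- sum of maximal run lengths that are ≥ 2 (the common value of both programs)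
def pvRunsum : List Char → Int
  | [] => 0
  | a :: rest =>
    let k := pvLead a rest
    if 1 + k ≥ 2 then ((1 + k : Nat) : Int) + pvRunsum (rest.drop k) else pvRunsum rest
termination_by l => l.length
decreasing_by
  · simp [List.length_drop]
  · simp

-- "a is not the head of t"
def pvNotHead (a : Char) (t : List Char) : Prop := ∀ b t', t = b :: t' → b ≠ a

lemma pvLead_eq_zero {a : Char} {t : List Char} (h : pvNotHead a t) : pvLead a t = 0 := by
  cases t with
  | nil => rfl
  | cons b t' => simp [pvLead, h b t' rfl]

lemma pvLead_replicate (a : Char) (k : Nat) (t : List Char) (h : pvNotHead a t) :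
    pvLead a (List.replicate k a ++ t) = k := by
  induction k with
  | zero => simpa using pvLead_eq_zero h
  | succ n ih => simp [List.replicate_succ, pvLead, ih]; omega

lemma pvRunsum_replicate (a : Char) (k : Nat) (t : List Char) (hk : 1 ≤ k) (h : pvNotHead a t) :
    pvRunsum (List.replicate k a ++ t) =
      (if 2 ≤ k then (k : Int) + pvRunsum t else pvRunsum t) := by
  obtain ⟨m, rfl⟩ : ∃ m, k = m + 1 := ⟨k - 1, by omega⟩
  rw [List.replicate_succ, List.cons_append, pvRunsum]
  have hl : pvLead a (List.replicate m a ++ t) = m := pvLead_replicate a m t h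
  simp only [hl]
  by_cases hm : 1 ≤ m
  · rw [if_pos (by omega), if_pos (by omega)]
    have : (List.replicate m a ++ t).drop m = t := by
      rw [List.drop_append_of_le_length (by simp)]
      simp
    rw [this]; push_cast; ring_nf
  · have hm0 : m = 0 := by omega
    subst hm0
    simp

-- every list splits at its leading run: t = replicate (pvLead a t) a ++ drop (pvLead a t) t
lemma pvLead_split (a : Char) (t : List Char) :
    t = List.replicate (pvLead a t) a ++ t.drop (pvLead a t) ∧ pvNotHead a (t.drop (pvLead a t)) := by
  induction t with
  | nil => exact ⟨rfl, by intro b t' h; simp at h⟩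
  | cons b t' ih =>
    by_cases hb : b = a
    · subst hb
      obtain ⟨h1, h2⟩ := ih
      have hl : pvLead b (b :: t') = pvLead b t' + 1 := by simp [pvLead]; omega
      constructor
      · rw [hl, List.replicate_succ, List.cons_append, List.drop_succ_cons]
        exact congrArg (List.cons b) h1
      · rw [hl, List.drop_succ_cons]
        exact h2
    · have hl : pvLead a (b :: t') = 0 := by simp [pvLead, hb]
      rw [hl]
      refine ⟨by simp, ?_⟩
      intro c t'' h
      simp only [List.drop_zero] at h
      injection h with h1 _
      rw [← h1]
      exact hb

-- === A side ===

lemma pvRunEnd_spec (x : List Char) (pre : Char) : ∀ (n j : Nat), x.length - j ≤ n → j ≤ x.length →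
    j ≤ pvRunEnd x pre j ∧ pvRunEnd x pre j ≤ x.length ∧
    x.drop j = List.replicate (pvRunEnd x pre j - j) pre ++ x.drop (pvRunEnd x pre j) ∧
    pvNotHead pre (x.drop (pvRunEnd x pre j)) := by
  intro n
  induction n with
  | zero =>
    intro j hn hj
    have hje : j = x.length := by omega
    rw [pvRunEnd, dif_neg (by omega)]
    refine ⟨le_refl _, by omega, by simp, ?_⟩
    intro b t' hbt
    rw [List.drop_of_length_le (by omega)] at hbt
    simp at hbt
  | succ n ih =>
    intro j hn hj
    by_cases h : j < x.length
    · rw [pvRunEnd, dif_pos h]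
      by_cases hx : x[j] = pre
      · rw [if_pos hx]
        obtain ⟨h1, h2, h3, h4⟩ := ih (j + 1) (by omega) (by omega)
        refine ⟨by omega, h2, ?_, h4⟩
        rw [List.drop_eq_getElem_cons h, h3, hx]
        have he : pvRunEnd x pre (j + 1) - j = (pvRunEnd x pre (j + 1) - (j + 1)) + 1 := by omega
        rw [he, List.replicate_succ]
        simp
      · rw [if_neg hx]
        refine ⟨le_refl _, by omega, by simp, ?_⟩
        intro b t' hbt
        rw [List.drop_eq_getElem_cons h] at hbt
        injection hbt with e1 _
        rw [← e1]
        exact hx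
    · rw [pvRunEnd, dif_neg h]
      refine ⟨le_refl _, by omega, by simp, ?_⟩
      intro b t' hbt
      rw [List.drop_of_length_le (by omega)] at hbt
      simp at hbt

lemma pvLoopA_eq (n : Nat) : ∀ (x : List Char) (i : Nat) (c : Int),
    3 * x.length - i ≤ n → i ≤ x.length →
    pvLoopA x i c = c + pvRunsum (x.drop i) := by
  induction n with
  | zero =>
    intro x i c hn hi
    have : i = x.length := by omega
    subst this
    rw [pvLoopA, dif_neg (by omega)]
    simp [pvRunsum]
  | succ n ih =>
    intro x i c hn hi
    by_cases h : i < x.length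
    · rw [pvLoopA, dif_pos h]
      by_cases h2 : i + 1 < x.length
      · rw [dif_pos h2]
        have hd : x.drop i = x[i] :: x.drop (i + 1) := List.drop_eq_getElem_cons h
        by_cases hx : x[i + 1] = x[i]
        · rw [if_pos hx]
          -- deletion branch
          set a := x[i] with ha
          obtain ⟨he1, he2, he3, he4⟩ := pvRunEnd_spec x a (x.length - (i + 1 + 1)) (i + 1 + 1) (le_refl _) (by omega)
          set ef := pvRunEnd x a (i + 1 + 1) with hef
          have hdd : x.drop (i + 1) = x[i + 1] :: x.drop (i + 1 + 1) := List.drop_eq_getElem_cons h2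
          -- x.drop i = replicate (ef - i) a ++ x.drop ef
          have hsplit : x.drop i = List.replicate (ef - i) a ++ x.drop ef := by
            rw [hd, hdd, hx, he3]
            have : ef - i = (ef - (i + 1 + 1)) + 1 + 1 := by omega
            rw [this, List.replicate_succ, List.replicate_succ]
            simp
          -- the new list
          set x' := x.take (i + 1 - 1) ++ x.drop ef with hx'
          have hlen' : x'.length = i + (x.length - ef) := by
            simp [hx', List.length_take, List.length_drop]; omega
          have hdrop' : x'.drop i = x.drop ef := by
            rw [hx']
            rw [List.drop_append_of_le_length (by simp; omega)]
            simp
          rw [ih x' (i + 1 - 1) _ (by omega) (by omega)]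
          simp only [Nat.add_sub_cancel] at hdrop' ⊢
          rw [hdrop', hsplit,
            pvRunsum_replicate a (ef - i) (x.drop ef) (by omega) he4,
            if_pos (by omega)]
          push_cast [Nat.cast_sub (by omega : i ≤ ef)]
          ring
        · rw [if_neg hx]
          rw [ih x (i + 1) c (by omega) (by omega)]
          have hdd : x.drop (i + 1) = x[i + 1] :: x.drop (i + 1 + 1) := List.drop_eq_getElem_cons h2
          rw [hd, pvRunsum]
          have hl : pvLead x[i] (x.drop (i + 1)) = 0 := by
            apply pvLead_eq_zero
            intro b t' hbt
            rw [hdd] at hbt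
            cases hbt; exact hx
          simp [hl]
      · rw [dif_neg h2]
        have hil : i + 1 = x.length := by omega
        have hd : x.drop i = x[i] :: x.drop (i + 1) := List.drop_eq_getElem_cons h
        rw [hd, List.drop_of_length_le (by omega)]
        simp [pvRunsum, pvLead]
    · rw [pvLoopA, dif_neg h]
      have : i = x.length := by omega
      rw [this, List.drop_of_length_le (le_refl _)]
      simp [pvRunsum]

-- === B side ===

lemma pvLoopB_run (a : Char) (j : Nat) (t : List Char) (r c : Int) :
    pvLoopB (List.replicate j a ++ t) (some a) r c = pvLoopB t (some a) (r + j) c := by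
  induction j generalizing r with
  | zero => simp
  | succ m ihm =>
    rw [List.replicate_succ, List.cons_append, pvLoopB, if_pos rfl, ihm]
    congr 1
    push_cast
    ring

def pvOkPrev (p : Option Char) (t : List Char) : Prop := ∀ b t', t = b :: t' → some b ≠ p

lemma pvLoopB_eq (n : Nat) : ∀ (t : List Char) (p : Option Char) (r c : Int),
    t.length ≤ n → pvOkPrev p t →
    pvLoopB t p r c = (if r ≥ 2 then r else 0) + c + pvRunsum t := by
  induction n with
  | zero =>
    intro t p r c hn _
    have : t = [] := List.eq_nil_of_length_eq_zero (by omega)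
    subst this
    rw [pvLoopB]
    simp [pvRunsum]
    split_ifs <;> ring
  | succ n ih =>
    intro t p r c hn hok
    cases t with
    | nil =>
      rw [pvLoopB]; simp [pvRunsum]; split_ifs <;> ring
    | cons b t' =>
      rw [pvLoopB, if_neg (hok b t' rfl)]
      obtain ⟨hsp, hnh⟩ := pvLead_split b t'
      set j := pvLead b t' with hj
      set t'' := t'.drop j with ht''
      have hlen : t''.length ≤ t'.length := by rw [ht'', List.length_drop]; omega
      conv_lhs => rw [hsp]
      rw [pvLoopB_run]
      have hok'' : pvOkPrev (some b) t'' := by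
        intro d td hdt heq
        injection heq with hdb
        exact hnh d td hdt hdb
      have hn' : t'.length + 1 ≤ n + 1 := by simpa using hn
      rw [ih t'' (some b) (1 + j) _ (by omega) hok'']
      rw [pvRunsum]
      simp only [← hj]
      by_cases hj1 : 1 ≤ j
      · have c1 : ((1 : Int) + (j : Int)) ≥ 2 := by omega
        have c2 : 1 + j ≥ 2 := by omega
        rw [if_pos c1, if_pos c2, ← ht'']
        push_cast
        split_ifs <;> ring
      · have hj0 : j = 0 := by omega
        have c1 : ¬ ((1 : Int) + (j : Int)) ≥ 2 := by omega
        have c2 : ¬ 1 + j ≥ 2 := by omega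
        rw [if_neg c1, if_neg c2]
        have het : t' = t'' := by rw [ht'', hj0]; simp
        rw [← het]
        split_ifs <;> ring

-- ===== VERDICT (by name: the statement is the Claim_ definition above) =====
theorem clear_letter_spec : Claim_equal_clear_letter := by
  intro x _ _
  unfold Spec_clear_letter clear_letter clear_letter_alt
  rw [pvLoopA_eq (3 * x.toList.length) x.toList 0 0 (by omega) (by omega),
    pvLoopB_eq x.toList.length x.toList none 0 0 (le_refl _) (by intro b t' _; simp)]
  simp
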